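-- pv_equiv track=rewrite | github.com/TailsTyler/advent_of_code_2025 | ty/02/2.py | starter_for_this_num_of_digits
-- ===== SOURCE A (Python) =====
-- def starter_for_this_num_of_digits(l):
--     if len(l) == 2:
--         return '11', '1'
--     i = 2
--     while i <= len(l):
--         if len(l) % i == 0:
--             rs = '1'
--             rs_len = len(l) // i
--             for x in range(rs_len - 1):
--                 rs += '0'
--
--             ans = rs
--             for x in range(i - 1):
--                 ans += rs
--             return ans, rs
--         i+=1
-- ===== SOURCE B (Python) =====
-- def starter_for_this_num_of_digits(l):
--     n = len(l)
--     for d in range(n - 1, 0, -1):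
--         if n % d == 0:
--             rs = '1' + '0' * (d - 1)
--             return rs * (n // d), rs
--     return None
-- ===== Notes on version B (the rewrite author's own statement) =====
-- stated objective: simpler
-- what changed: A scans upward for the smallest divisor i>=2 of n=len(l) and builds both strings character-by-character in loops (plus a hard-coded n==2 special case); B scans downward for the largest proper divisor d, builds the block '1'+'0'*(d-1) with string repetition and returns (block*(n//d), block), with no special case.
import Mathlib
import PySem

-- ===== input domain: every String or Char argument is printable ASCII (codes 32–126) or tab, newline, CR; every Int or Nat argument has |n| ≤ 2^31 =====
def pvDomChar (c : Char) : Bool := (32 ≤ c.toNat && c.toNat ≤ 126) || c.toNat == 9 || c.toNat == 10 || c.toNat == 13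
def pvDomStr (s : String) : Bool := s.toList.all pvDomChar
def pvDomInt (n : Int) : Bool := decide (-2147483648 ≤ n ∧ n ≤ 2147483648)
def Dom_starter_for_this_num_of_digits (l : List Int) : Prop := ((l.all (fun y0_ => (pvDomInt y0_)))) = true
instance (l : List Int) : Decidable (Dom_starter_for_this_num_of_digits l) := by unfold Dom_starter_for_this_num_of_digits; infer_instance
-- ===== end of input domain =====

-- B replaces A's upward scan for the smallest divisor i ≥ 2 (then char-by-char string building)
-- by a downward scan for the largest proper divisor d, building the block string '1'+'0'*(d-1)
-- directly and repeating it n//d times; objective: simpler (no measured speedup claimed).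
-- Strings are built on List Char and wrapped with String.ofList (Lean's String.append is opaque).

-- ===== PORT A =====
-- while i <= len(l): if len(l) % i == 0: build rs char by char, ans block by block
def pvA_loop (n i : Nat) : Option (String × String) :=
  if h : i ≤ n then
    if n % i == 0 then
      let rsLen := n / i
      let rs := (List.range (rsLen - 1)).foldl (fun s _ => s ++ ['0']) ['1']
      let ans := (List.range (i - 1)).foldl (fun s _ => s ++ rs) rs
      some (String.ofList ans, String.ofList rs)
    else pvA_loop n (i + 1)
  else none
termination_by n + 1 - i
decreasing_by omega

def starter_for_this_num_of_digits (l : List Int) : Option (String × String) :=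
  if l.length == 2 then some ("11", "1")
  else pvA_loop l.length 2

-- ===== PORT B =====
-- for d in range(n-1, 0, -1): first divisor d is the largest proper divisor
def pvB_loop (n : Nat) : Nat → Option (String × String)
  | 0 => none
  | d + 1 =>
    if n % (d + 1) == 0 then
      let rs := '1' :: List.replicate d '0'
      some (String.ofList (List.replicate (n / (d + 1)) rs).flatten, String.ofList rs)
    else pvB_loop n d

def starter_for_this_num_of_digits_alt (l : List Int) : Option (String × String) :=
  pvB_loop l.length (l.length - 1)

-- ===== PRECONDITION & SPEC =====
def Spec_starter_for_this_num_of_digits (l : List Int) (out : Option (String × String)) : Prop := out = starter_for_this_num_of_digits_alt l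
instance (l : List Int) (out : Option (String × String)) : Decidable (Spec_starter_for_this_num_of_digits l out) := by unfold Spec_starter_for_this_num_of_digits; infer_instance

-- ===== CLAIM (what is proved, stated in full; the proofs are below) =====
def Claim_equal_starter_for_this_num_of_digits : Prop := ∀ (l : List Int), Dom_starter_for_this_num_of_digits l → Spec_starter_for_this_num_of_digits l (starter_for_this_num_of_digits l)

-- ===== LEMMAS AND PROOFS =====

-- the common result value for block length len+1 repeated cnt times
def pvVal (cnt len : Nat) : Option (String × String) :=
  some (String.ofList (List.replicate cnt ('1' :: List.replicate len '0')).flatten,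
        String.ofList ('1' :: List.replicate len '0'))

lemma foldl_zeros (k : Nat) (c : List Char) :
    (List.range k).foldl (fun s _ => s ++ ['0']) c = c ++ List.replicate k '0' := by
  induction k with
  | zero => simp
  | succ k ih => simp [List.range_succ, ih, List.replicate_succ']

lemma foldl_blocks (k : Nat) (c rs : List Char) :
    (List.range k).foldl (fun s _ => s ++ rs) c = c ++ (List.replicate k rs).flatten := by
  induction k with
  | zero => simp
  | succ k ih => simp [List.range_succ, ih, List.replicate_succ']

lemma rep_flatten {α : Type} (m : Nat) (hm : 1 ≤ m) (rs : List α) :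
    (List.replicate m rs).flatten = rs ++ (List.replicate (m - 1) rs).flatten := by
  obtain ⟨m', rfl⟩ : ∃ m', m = m' + 1 := ⟨m - 1, by omega⟩
  simp [List.replicate_succ]

lemma aLoop_eq (n : Nat) (hn : 2 ≤ n) :
    ∀ i, 2 ≤ i → i ≤ n.minFac → pvA_loop n i = pvVal n.minFac (n / n.minFac - 1) := by
  have hple : n.minFac ≤ n := Nat.minFac_le (by omega)
  intro i h2 hle
  induction hk : n.minFac - i generalizing i with
  | zero =>
    have hi : i = n.minFac := by omega
    subst hi
    have hdvd : n % n.minFac = 0 := Nat.mod_eq_zero_of_dvd (Nat.minFac_dvd n)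
    rw [pvA_loop]
    simp only [dif_pos hple, hdvd, beq_self_eq_true, if_pos]
    simp only [foldl_zeros, foldl_blocks, pvVal]
    rw [rep_flatten n.minFac (by omega) ('1' :: List.replicate (n / n.minFac - 1) '0')]
    simp
  | succ k ih =>
    have hlt : i < n.minFac := by omega
    have hne : ¬ (n % i == 0) = true := by
      simp only [beq_iff_eq]
      intro hmod
      have : n.minFac ≤ i := Nat.minFac_le_of_dvd h2 (Nat.dvd_of_mod_eq_zero hmod)
      omega
    rw [pvA_loop]
    simp only [dif_pos (by omega : i ≤ n), if_neg hne]
    exact ih (i + 1) (by omega) (by omega) (by omega)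

lemma bLoop_eq (n : Nat) (hn : 2 ≤ n) :
    ∀ d, n / n.minFac ≤ d → d < n → pvB_loop n d = pvVal (n / (n / n.minFac)) (n / n.minFac - 1) := by
  have hp2 : 2 ≤ n.minFac := (Nat.minFac_prime (by omega : n ≠ 1)).two_le
  have hple : n.minFac ≤ n := Nat.minFac_le (by omega)
  have hgpos : 1 ≤ n / n.minFac := Nat.one_le_div_iff (by omega) |>.2 hple
  intro d
  induction d with
  | zero => intro hg _; omega
  | succ d ih =>
    intro hg hd
    by_cases hcase : n / n.minFac = d + 1
    · have hdvd : n % (d + 1) = 0 := by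
        rw [← hcase]
        exact Nat.mod_eq_zero_of_dvd (Nat.div_dvd_of_dvd (Nat.minFac_dvd n))
      simp only [pvB_loop, hdvd, beq_self_eq_true, if_pos, pvVal, hcase, Nat.add_sub_cancel]
    · have hgd : n / n.minFac ≤ d := by omega
      have hne : ¬ (n % (d + 1) == 0) = true := by
        simp only [beq_iff_eq]
        intro hmod
        have hdvd : (d + 1) ∣ n := Nat.dvd_of_mod_eq_zero hmod
        have hq2 : 2 ≤ n / (d + 1) := by
          rcases Nat.lt_or_ge (n / (d + 1)) 2 with h | h
          · obtain ⟨c, hc⟩ := hdvd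
            have hcv : c = n / (d + 1) := by
              rw [hc]; rw [Nat.mul_div_cancel_left _ (by omega)]
            have hc1 : c ≤ 1 := by omega
            rcases Nat.le_one_iff_eq_zero_or_eq_one.1 hc1 with rfl | rfl <;> omega
          · exact h
        have hmle : n.minFac ≤ n / (d + 1) :=
          Nat.minFac_le_of_dvd hq2 (Nat.div_dvd_of_dvd hdvd)
        have h1 : n / (n / (d + 1)) ≤ n / n.minFac :=
          Nat.div_le_div_left hmle (by omega)
        have h2 : n / (n / (d + 1)) = d + 1 := Nat.div_div_self hdvd (by omega)
        omega
      simp only [pvB_loop, if_neg hne]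
      exact ih hgd (by omega)

lemma main_eq (n : Nat) :
    (if n == 2 then some (("11" : String), ("1" : String)) else pvA_loop n 2) = pvB_loop n (n - 1) := by
  match n with
  | 0 => rw [pvA_loop]; simp [pvB_loop]
  | 1 => rw [pvA_loop]; simp [pvB_loop]
  | 2 => simp only [pvB_loop]; norm_num; rfl
  | (m + 3) =>
    set n := m + 3 with hn
    have hn2 : 2 ≤ n := by omega
    have hp2 : 2 ≤ n.minFac := (Nat.minFac_prime (by omega : n ≠ 1)).two_le
    have hple : n.minFac ≤ n := Nat.minFac_le (by omega)
    have hgle : n / n.minFac ≤ n - 1 := by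
      have h1 : n / n.minFac ≤ n / 2 := Nat.div_le_div_left hp2 (by omega)
      have h2 : n / 2 < n := Nat.div_lt_self (by omega) (by omega)
      omega
    rw [if_neg (by simp; omega)]
    rw [aLoop_eq n hn2 2 (by omega) hp2, bLoop_eq n hn2 (n - 1) hgle (by omega)]
    rw [Nat.div_div_self (Nat.minFac_dvd n) (by omega)]

-- ===== VERDICT (by name: the statement is the Claim_ definition above) =====
theorem starter_for_this_num_of_digits_spec : Claim_equal_starter_for_this_num_of_digits := by
  intro l _
  unfold Spec_starter_for_this_num_of_digits starter_for_this_num_of_digits starter_for_this_num_of_digits_alt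
  exact main_eq l.length
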